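-- pv_equiv track=rewrite | github.com/MariaEduardaLeal/Exercicio-IA | ex8.py | bfs_animado
-- ===== SOURCE A (Python) =====
-- from collections import deque
--
-- def bfs_animado(grid, start, goal):
--     queue = deque([[start]])
--     visited = set()
--     visited.add(start)
--     explorados = []
--
--     while queue:
--         path = queue.popleft()
--         x, y = path[-1]
--         explorados.append((x, y))
--
--         if (x, y) == goal:
--             return explorados, path
--
--         for dx, dy in [(-1, 0), (1, 0), (0, -1), (0, 1)]:
--             next_pos = (x + dx, y + dy)
--             if 0 <= next_pos[0] < len(grid) and 0 <= next_pos[1] < len(grid[0]) and next_pos not in visited: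
--                 queue.append(path + [next_pos])
--                 visited.add(next_pos)
--     return explorados, None
-- ===== SOURCE B (Python) =====
-- def bfs_animado(grid, start, goal):
--     # Level-synchronized BFS: frontiers of single cells; the parents dict doubles
--     # as the visited set (start maps to None) and the path is rebuilt once at the end.
--     rows = len(grid)
--     cols = len(grid[0]) if grid else 0
--     parents = {start: None}
--     explorados = []
--     frontier = [start]
--     while frontier:
--         next_frontier = []
--         for cell in frontier:
--             explorados.append(cell)
--             if cell == goal:
--                 path = []
--                 cur = cell
--                 while cur is not None:
--                     path.append(cur)
--                     cur = parents[cur]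
--                 return explorados, path[::-1]
--             x, y = cell
--             for n in ((x - 1, y), (x + 1, y), (x, y - 1), (x, y + 1)):
--                 if 0 <= n[0] < rows and 0 <= n[1] < cols and n not in parents:
--                     parents[n] = cell
--                     next_frontier.append(n)
--         frontier = next_frontier
--     return explorados, None
-- ===== Notes on version B (the rewrite author's own statement) =====
-- stated objective: alternative
-- what changed: A runs one FIFO loop over a queue of whole paths, copying path+[next] at every enqueue; B runs a level-synchronized BFS over single cells whose parents dict doubles as the visited set, reconstructing the path once when the goal is popped.
import Mathlib
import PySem

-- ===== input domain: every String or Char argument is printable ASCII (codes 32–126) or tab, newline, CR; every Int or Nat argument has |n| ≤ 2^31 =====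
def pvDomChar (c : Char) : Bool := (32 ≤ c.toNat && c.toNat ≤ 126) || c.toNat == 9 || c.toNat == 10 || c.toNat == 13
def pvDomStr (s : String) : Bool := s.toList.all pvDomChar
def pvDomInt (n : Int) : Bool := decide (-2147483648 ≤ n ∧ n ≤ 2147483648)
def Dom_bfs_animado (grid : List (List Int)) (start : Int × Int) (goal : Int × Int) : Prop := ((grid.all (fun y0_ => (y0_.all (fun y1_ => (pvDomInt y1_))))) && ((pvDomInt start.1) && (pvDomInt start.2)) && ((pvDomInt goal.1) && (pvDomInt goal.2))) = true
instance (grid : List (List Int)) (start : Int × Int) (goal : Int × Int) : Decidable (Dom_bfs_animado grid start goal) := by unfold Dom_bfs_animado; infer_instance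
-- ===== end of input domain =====

-- B replaces A's FIFO queue of whole copied paths by a level-synchronized BFS over single
-- cells whose parents dict doubles as the visited set; the path is rebuilt once at the end
-- (objective: alternative).

-- ===== PORT A =====
-- A's loop body for the four directions (the body of its `for dx, dy in …` loop).
def stepA (grid : List (List Int)) (path : List (Int × Int)) (xy : Int × Int)
    (st : List (List (Int × Int)) × PySem.Set (Int × Int)) (d : Int × Int) :
    List (List (Int × Int)) × PySem.Set (Int × Int) :=
  let np := (xy.1 + d.1, xy.2 + d.2)
  if 0 ≤ np.1 ∧ np.1 < grid.length ∧ 0 ≤ np.2 ∧ np.2 < (grid.headD []).length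
      ∧ ¬ st.2.contains np then
    (st.1 ++ [path ++ [np]], st.2.add np)
  else st

-- A's while loop; fuel only guards totality: the loop runs at most 1 + rows*cols iterations
-- (each iteration consumes one enqueue; every enqueue after the first inserts a fresh
-- in-bounds cell into visited), so the fuel passed below is never exhausted on a real run.
def bfsLoopA (grid : List (List Int)) (goal : Int × Int) :
    Nat → List (List (Int × Int)) → PySem.Set (Int × Int) → List (Int × Int) →
    (List (Int × Int)) × (Option (List (Int × Int)))
  | 0, _, _, ex => (ex, none)
  | fuel + 1, queue, visited, ex =>
    match queue with
    | [] => (ex, none)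
    | path :: rest =>
      let xy := (PySem.List.pyGet? path (-1)).getD (0, 0)   -- x, y = path[-1] (path is never empty)
      let ex' := ex ++ [xy]
      if xy = goal then (ex', some path)
      else
        let st := [((-1 : Int), (0 : Int)), (1, 0), (0, -1), (0, 1)].foldl
          (stepA grid path xy) (rest, visited)
        bfsLoopA grid goal fuel st.1 st.2 ex'

def bfs_animado (grid : List (List Int)) (start : Int × Int) (goal : Int × Int) : (List (Int × Int)) × (Option (List (Int × Int))) :=
  bfsLoopA grid goal (grid.length * (grid.headD []).length + 1)
    [[start]] (PySem.Set.add PySem.Set.empty start) []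

-- ===== PORT B =====
-- Source B's path-reconstruction while loop: Python appends each cur and reverses with [::-1];
-- consing onto the accumulator builds that reversed list directly. `parents[cur]` is total
-- here because cur is always a key (the chain follows recorded parents); fuel only guards
-- totality (the chain visits distinct keys, so size + 1 steps always suffice).
def reconB (par : PySem.Dict (Int × Int) (Option (Int × Int))) :
    Nat → (Int × Int) → List (Int × Int) → List (Int × Int)
  | 0, cur, acc => cur :: acc
  | fuel + 1, cur, acc =>
    match par.get? cur with
    | some (some p) => reconB par fuel p (cur :: acc)
    | _ => cur :: acc                        -- parents[cur] is None: the chain ends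

-- Source B's `if 0 <= n[0] < rows and 0 <= n[1] < cols and n not in parents: …` for one
-- neighbour n of cell; state = (parents, next_frontier).
def tryAdd (grid : List (List Int)) (cell n : Int × Int)
    (st : PySem.Dict (Int × Int) (Option (Int × Int)) × List (Int × Int)) :
    PySem.Dict (Int × Int) (Option (Int × Int)) × List (Int × Int) :=
  if 0 ≤ n.1 ∧ n.1 < grid.length ∧ 0 ≤ n.2 ∧ n.2 < (grid.headD []).length
      ∧ ¬ st.1.contains n then
    (st.1.insert n (some cell), st.2 ++ [n])
  else st

-- Source B's inner `for cell in frontier` loop: either an early return (goal reached or out of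
-- fuel) or the state for the next level. Fuel is threaded through and pays one unit per
-- cell processed, exactly mirroring A's per-pop fuel; it never runs out on a real run.
def scanLevel (grid : List (List Int)) (goal : Int × Int) :
    Nat → List (Int × Int) → List (Int × Int) →
    PySem.Dict (Int × Int) (Option (Int × Int)) → List (Int × Int) →
    ((List (Int × Int)) × Option (List (Int × Int))) ⊕
      (Nat × List (Int × Int) × PySem.Dict (Int × Int) (Option (Int × Int)) × List (Int × Int))
  | fuel, [], ex, par, nf => Sum.inr (fuel, ex, par, nf)
  | 0, _ :: _, ex, _, _ => Sum.inl (ex, none)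
  | fuel + 1, cell :: rest, ex, par, nf =>
    let ex' := ex ++ [cell]
    if cell = goal then Sum.inl (ex', some (reconB par (par.size + 1) cell []))
    else
      let s1 := tryAdd grid cell (cell.1 - 1, cell.2) (par, nf)
      let s2 := tryAdd grid cell (cell.1 + 1, cell.2) s1
      let s3 := tryAdd grid cell (cell.1, cell.2 - 1) s2
      let s4 := tryAdd grid cell (cell.1, cell.2 + 1) s3
      scanLevel grid goal fuel rest ex' s4.1 s4.2

-- termination helper for levelLoop: a scan of a NONEMPTY frontier strictly consumes fuel
lemma scanLevel_fuel_le (grid : List (List Int)) (goal : Int × Int) :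
    ∀ (front : List (Int × Int)) (fuel : Nat) (ex : List (Int × Int))
      (par : PySem.Dict (Int × Int) (Option (Int × Int))) (nf : List (Int × Int))
      (f' : Nat) (s : List (Int × Int) × PySem.Dict (Int × Int) (Option (Int × Int)) × List (Int × Int)),
      scanLevel grid goal fuel front ex par nf = Sum.inr (f', s) →
      f' ≤ fuel ∧ (front ≠ [] → f' < fuel)
  | [], fuel, ex, par, nf, f', s => by
      intro h
      simp only [scanLevel, Sum.inr.injEq, Prod.mk.injEq] at h
      exact ⟨le_of_eq h.1.symm, fun hne => absurd rfl hne⟩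
  | c :: rest, 0, ex, par, nf, f', s => by
      intro h; simp [scanLevel] at h
  | c :: rest, fuel + 1, ex, par, nf, f', s => by
      intro h
      simp only [scanLevel] at h
      split at h
      · simp at h
      · have := scanLevel_fuel_le grid goal rest fuel _ _ _ f' s h
        omega

-- Source B's outer `while frontier` loop
def levelLoop (grid : List (List Int)) (goal : Int × Int) :
    Nat → List (Int × Int) → PySem.Dict (Int × Int) (Option (Int × Int)) →
    List (Int × Int) → (List (Int × Int)) × (Option (List (Int × Int)))
  | _, [], _, ex => (ex, none)
  | fuel, c :: rest, par, ex =>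
    match h : scanLevel grid goal fuel (c :: rest) ex par [] with
    | Sum.inl r => r
    | Sum.inr (f', ex', par', nf) => levelLoop grid goal f' nf par' ex'
  termination_by fuel _ _ _ => fuel
  decreasing_by
    exact (scanLevel_fuel_le grid goal _ fuel _ _ _ _ _ h).2 (by simp)

def bfs_animado_alt (grid : List (List Int)) (start : Int × Int) (goal : Int × Int) : (List (Int × Int)) × (Option (List (Int × Int))) :=
  levelLoop grid goal (grid.length * (grid.headD []).length + 1)
    [start] (PySem.Dict.empty.insert start none) []

-- ===== PRECONDITION & SPEC =====
def Spec_bfs_animado (grid : List (List Int)) (start : Int × Int) (goal : Int × Int) (out : (List (Int × Int)) × (Option (List (Int × Int)))) : Prop := out = bfs_animado_alt grid start goal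
instance (grid : List (List Int)) (start : Int × Int) (goal : Int × Int) (out : (List (Int × Int)) × (Option (List (Int × Int)))) : Decidable (Spec_bfs_animado grid start goal out) := by unfold Spec_bfs_animado; infer_instance

-- ===== CLAIM (what is proved, stated in full; the proofs are below) =====
def Claim_equal_bfs_animado : Prop := ∀ (grid : List (List Int)) (start : Int × Int) (goal : Int × Int), Dom_bfs_animado grid start goal → Spec_bfs_animado grid start goal (bfs_animado grid start goal)

-- ===== LEMMAS AND PROOFS =====

-- A's visited set and B's parents dict hold the same cells
def VisEq (vis : PySem.Set (Int × Int)) (par : PySem.Dict (Int × Int) (Option (Int × Int))) : Prop :=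
  ∀ n : Int × Int, vis.contains n = par.contains n

-- the parent chain recorded by B, read from the endpoint backwards (list = path.reverse)
def ChainB (par : PySem.Dict (Int × Int) (Option (Int × Int))) : List (Int × Int) → Prop
  | [] => False
  | [q] => par.get? q = some none
  | q :: r :: t => par.get? q = some (some r) ∧ ChainB par (r :: t)

-- ties one whole path of A's queue to the matching single cell of B's frontier
def PathInvB (par : PySem.Dict (Int × Int) (Option (Int × Int)))
    (p : List (Int × Int)) (n : Int × Int) : Prop :=
  p.reverse.head? = some n ∧ ChainB par p.reverse ∧
    (∀ q ∈ p, par.contains q = true) ∧ p.length ≤ par.size + 1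

lemma chainB_insert_fresh (par : PySem.Dict (Int × Int) (Option (Int × Int)))
    (np : Int × Int) (v : Option (Int × Int)) :
    ∀ l, (∀ q ∈ l, q ≠ np) → ChainB par l → ChainB (par.insert np v) l
  | [] => fun _ h => h.elim
  | [q] => by
      intro hne h
      simp only [ChainB] at h ⊢
      rw [PySem.Dict.get?_insert_of_ne par v (hne q (by simp))]
      exact h
  | q :: r :: t => by
      intro hne h
      simp only [ChainB] at h ⊢
      refine ⟨?_, chainB_insert_fresh par np v (r :: t)
        (fun x hx => hne x (List.mem_cons_of_mem q hx)) h.2⟩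
      rw [PySem.Dict.get?_insert_of_ne par v (hne q (by simp))]
      exact h.1

lemma size_le_size_insert (par : PySem.Dict (Int × Int) (Option (Int × Int)))
    (k : Int × Int) (v : Option (Int × Int)) : par.size ≤ (par.insert k v).size := by
  rw [PySem.Dict.size_insert]
  split <;> omega

lemma pathInvB_mono (par : PySem.Dict (Int × Int) (Option (Int × Int)))
    (np : Int × Int) (v : Option (Int × Int)) (hnp : par.contains np = false)
    {p : List (Int × Int)} {n : Int × Int}
    (h : PathInvB par p n) : PathInvB (par.insert np v) p n := by
  obtain ⟨h1, h2, h3, h4⟩ := h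
  refine ⟨h1, ?_, ?_, ?_⟩
  · refine chainB_insert_fresh par np v p.reverse (fun q hq hqe => ?_) h2
    have := h3 q (List.mem_reverse.mp hq)
    rw [hqe, hnp] at this; exact absurd this (by simp)
  · intro q hq
    rw [PySem.Dict.contains_insert]
    simp [h3 q hq]
  · exact le_trans h4 (by have := size_le_size_insert par np v; omega)

-- B's reconstruction loop rebuilds exactly the chain recorded in `parents`
lemma reconB_chain (par : PySem.Dict (Int × Int) (Option (Int × Int))) :
    ∀ (t : List (Int × Int)) (q : Int × Int) (acc : List (Int × Int)) (fuel : Nat),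
      ChainB par (q :: t) → t.length ≤ fuel →
      reconB par fuel q acc = (q :: t).reverse ++ acc
  | [], q, acc, fuel => by
      intro hc _
      simp only [ChainB] at hc
      cases fuel with
      | zero => simp [reconB]
      | succ f => simp [reconB, hc]
  | r :: t', q, acc, fuel => by
      intro hc hf
      simp only [ChainB] at hc
      cases fuel with
      | zero => simp at hf
      | succ f =>
        simp only [reconB, hc.1]
        rw [reconB_chain par t' r (q :: acc) f hc.2 (by simpa using hf)]
        simp

-- joint invariant for one neighbour step: stA.1 = A's queue tail, rC ++ stB.2 its cells
def JInv (rC : List (Int × Int)) (path : List (Int × Int)) (c : Int × Int)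
    (stA : List (List (Int × Int)) × PySem.Set (Int × Int))
    (stB : PySem.Dict (Int × Int) (Option (Int × Int)) × List (Int × Int)) : Prop :=
  VisEq stA.2 stB.1 ∧ List.Forall₂ (PathInvB stB.1) stA.1 (rC ++ stB.2) ∧
    PathInvB stB.1 path c

lemma step_one (grid : List (List Int)) (rC : List (Int × Int))
    (path : List (Int × Int)) (c d : Int × Int)
    (stA : List (List (Int × Int)) × PySem.Set (Int × Int))
    (stB : PySem.Dict (Int × Int) (Option (Int × Int)) × List (Int × Int))
    (h : JInv rC path c stA stB) :
    JInv rC path c (stepA grid path c stA d) (tryAdd grid c (c.1 + d.1, c.2 + d.2) stB) := by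
  obtain ⟨hv, hq, hp⟩ := h
  have hv' := hv (c.1 + d.1, c.2 + d.2)
  simp only [stepA, tryAdd, hv']
  set np : Int × Int := (c.1 + d.1, c.2 + d.2) with hnpdef
  split_ifs with hc
  · have hfresh : stB.1.contains np = false := by
      have := hc.2.2.2.2; simpa using this
    obtain ⟨hh, hcch, hmem, hlen⟩ := hp
    obtain ⟨t, ht⟩ : ∃ t, path.reverse = c :: t := by
      cases hr : path.reverse with
      | nil => rw [hr] at hh; simp at hh
      | cons a t => rw [hr] at hh; simp at hh; exact ⟨t, by rw [hh]⟩
    refine ⟨?_, ?_, pathInvB_mono stB.1 np (some c) hfresh ⟨hh, hcch, hmem, hlen⟩⟩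
    · intro m
      show (stA.2.add np).contains m = (stB.1.insert np (some c)).contains m
      have hmv : m ∈ stA.2 ↔ stB.1.contains m = true := by
        rw [← PySem.Set.contains_iff, hv m]
      rw [Bool.eq_iff_iff]
      simp only [PySem.Set.contains_iff, PySem.Set.mem_add, PySem.Dict.contains_insert,
        Bool.or_eq_true, beq_iff_eq, hmv]
      tauto
    · show List.Forall₂ (PathInvB (stB.1.insert np (some c)))
        (stA.1 ++ [path ++ [np]]) (rC ++ (stB.2 ++ [np]))
      rw [show rC ++ (stB.2 ++ [np]) = (rC ++ stB.2) ++ [np] by simp]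
      refine List.rel_append (hq.imp (fun _ _ hx => pathInvB_mono stB.1 np (some c) hfresh hx)) ?_
      refine List.forall₂_cons.mpr ⟨?_, List.Forall₂.nil⟩
      refine ⟨by simp, ?_, ?_, ?_⟩
      · show ChainB _ (path ++ [np]).reverse
        rw [List.reverse_append, List.reverse_cons, List.reverse_nil, List.nil_append,
          List.singleton_append, ht]
        refine ⟨PySem.Dict.get?_insert_self _ _ _, chainB_insert_fresh _ np (some c) (c :: t)
          (fun q hqm hqe => ?_) (ht ▸ hcch)⟩
        have := hmem q (List.mem_reverse.mp (ht ▸ hqm))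
        rw [hqe, hfresh] at this; exact absurd this (by simp)
      · intro q hqm
        rcases List.mem_append.mp hqm with h1 | h1
        · rw [PySem.Dict.contains_insert]; simp [hmem q h1]
        · simp at h1; subst h1
          exact PySem.Dict.contains_insert_self _ _ _
      · rw [List.length_append, PySem.Dict.size_insert, hfresh]
        simp at hlen ⊢; omega
  · exact ⟨hv, hq, hp⟩

-- split a Forall₂ along an append on the right
lemma forall₂_split {α β : Type} {R : α → β → Prop} :
    ∀ (l₁ : List β) (l₂ : List β) (l : List α), List.Forall₂ R l (l₁ ++ l₂) →
      ∃ m₁ m₂, l = m₁ ++ m₂ ∧ List.Forall₂ R m₁ l₁ ∧ List.Forall₂ R m₂ l₂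
  | [], l₂, l => fun h => ⟨[], l, rfl, List.Forall₂.nil, h⟩
  | b :: l₁, l₂, l => by
      intro h
      cases h with
      | cons h₁ h₂ =>
        obtain ⟨m₁, m₂, rfl, hm₁, hm₂⟩ := forall₂_split l₁ l₂ _ h₂
        exact ⟨_ :: m₁, m₂, rfl, List.Forall₂.cons h₁ hm₁, hm₂⟩

-- plain-match unfolding of levelLoop on a nonempty frontier
lemma levelLoop_cons (grid : List (List Int)) (goal : Int × Int) (fuel : Nat)
    (c : Int × Int) (rest : List (Int × Int))
    (par : PySem.Dict (Int × Int) (Option (Int × Int))) (ex : List (Int × Int)) :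
    levelLoop grid goal fuel (c :: rest) par ex =
      (match scanLevel grid goal fuel (c :: rest) ex par [] with
       | Sum.inl r => r
       | Sum.inr (f', ex', par', nf') => levelLoop grid goal f' nf' par' ex') := by
  rw [levelLoop]
  cases h : scanLevel grid goal fuel (c :: rest) ex par [] with
  | inl r => simp
  | inr s =>
    obtain ⟨f', ex', par', nf'⟩ := s
    simp

-- one popped cell: A pops a whole path, B scans one frontier cell; both then continue
lemma cell_step (grid : List (List Int)) (goal : Int × Int) (fuel : Nat)
    (p : List (Int × Int)) (rP : List (List (Int × Int))) (c : Int × Int) (rC : List (Int × Int))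
    (nfP : List (List (Int × Int))) (nfC : List (Int × Int))
    (vis : PySem.Set (Int × Int)) (par : PySem.Dict (Int × Int) (Option (Int × Int)))
    (ex : List (Int × Int))
    (IH : ∀ (frontP : List (List (Int × Int))) (frontC : List (Int × Int))
      (nfP : List (List (Int × Int))) (nfC : List (Int × Int))
      (vis : PySem.Set (Int × Int)) (par : PySem.Dict (Int × Int) (Option (Int × Int)))
      (ex : List (Int × Int)),
      VisEq vis par → List.Forall₂ (PathInvB par) frontP frontC →
      List.Forall₂ (PathInvB par) nfP nfC →
      bfsLoopA grid goal fuel (frontP ++ nfP) vis ex =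
        (match scanLevel grid goal fuel frontC ex par nfC with
         | Sum.inl r => r
         | Sum.inr (f', ex', par', nf') => levelLoop grid goal f' nf' par' ex'))
    (hv : VisEq vis par) (hp : PathInvB par p c)
    (hr : List.Forall₂ (PathInvB par) rP rC) (hnf : List.Forall₂ (PathInvB par) nfP nfC) :
    bfsLoopA grid goal (fuel + 1) ((p :: rP) ++ nfP) vis ex =
      (match scanLevel grid goal (fuel + 1) (c :: rC) ex par nfC with
       | Sum.inl r => r
       | Sum.inr (f', ex', par', nf') => levelLoop grid goal f' nf' par' ex') := by
  obtain ⟨hh, hcch, hmem, hlen⟩ := hp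
  have hxy : (PySem.List.pyGet? p (-1)).getD (0, 0) = c := by
    rw [PySem.List.pyGet?_neg_one, ← List.head?_reverse, hh]; rfl
  by_cases hg : c = goal
  · -- goal popped: A returns the stored path, B reconstructs the same chain
    obtain ⟨t, ht⟩ : ∃ t, p.reverse = c :: t := by
      cases hrv : p.reverse with
      | nil => rw [hrv] at hh; simp at hh
      | cons a t => rw [hrv] at hh; simp at hh; exact ⟨t, by rw [hh]⟩
    have hrec : reconB par (par.size + 1) c [] = p := by
      have hct : ChainB par (c :: t) := ht ▸ hcch
      have hlt : t.length ≤ par.size + 1 := by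
        have : p.reverse.length = t.length + 1 := by rw [ht]; simp
        simp at this; omega
      rw [reconB_chain par t c [] (par.size + 1) hct hlt, List.append_nil, ← ht,
        List.reverse_reverse]
    subst hg
    simp [bfsLoopA, scanLevel, hxy, hrec]
  · have e1 : ((c.1 - 1 : Int), c.2) = (c.1 + (-1 : Int), c.2 + (0 : Int)) := by
      simp [Prod.mk.injEq]; omega
    have e2 : ((c.1 + 1 : Int), c.2) = (c.1 + (1 : Int), c.2 + (0 : Int)) := by
      simp
    have e3 : ((c.1 : Int), c.2 - 1) = (c.1 + (0 : Int), c.2 + (-1 : Int)) := by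
      simp; omega
    have e4 : ((c.1 : Int), c.2 + 1) = (c.1 + (0 : Int), c.2 + (1 : Int)) := by
      simp
    have hJ4 : JInv rC p c
        (stepA grid p c (stepA grid p c (stepA grid p c (stepA grid p c
          (rP ++ nfP, vis) (-1, 0)) (1, 0)) (0, -1)) (0, 1))
        (tryAdd grid c (c.1 + 0, c.2 + 1) (tryAdd grid c (c.1 + 0, c.2 + -1)
          (tryAdd grid c (c.1 + 1, c.2 + 0) (tryAdd grid c (c.1 + -1, c.2 + 0) (par, nfC))))) := by
      refine step_one grid rC p c (0, 1) _ _ (step_one grid rC p c (0, -1) _ _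
        (step_one grid rC p c (1, 0) _ _ (step_one grid rC p c (-1, 0) _ _ ?_)))
      exact ⟨hv, List.rel_append hr hnf, ⟨hh, hcch, hmem, hlen⟩⟩
    obtain ⟨hv4, hq4, -⟩ := hJ4
    obtain ⟨m₁, m₂, hsplit, hm₁, hm₂⟩ := forall₂_split _ _ _ hq4
    simp only [bfsLoopA, scanLevel, List.cons_append, hxy, if_neg hg, List.foldl]
    rw [e1, e2, e3, e4, hsplit]
    exact IH m₁ rC m₂ _ _ _ _ hv4 hm₁ hm₂

-- the main simulation: A's single FIFO loop vs B mid-level (remaining frontier + next level)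
lemma main_sim (grid : List (List Int)) (goal : Int × Int) :
    ∀ (fuel : Nat) (frontP : List (List (Int × Int))) (frontC : List (Int × Int))
      (nfP : List (List (Int × Int))) (nfC : List (Int × Int))
      (vis : PySem.Set (Int × Int)) (par : PySem.Dict (Int × Int) (Option (Int × Int)))
      (ex : List (Int × Int)),
      VisEq vis par →
      List.Forall₂ (PathInvB par) frontP frontC →
      List.Forall₂ (PathInvB par) nfP nfC →
      bfsLoopA grid goal fuel (frontP ++ nfP) vis ex =
        (match scanLevel grid goal fuel frontC ex par nfC with
         | Sum.inl r => r
         | Sum.inr (f', ex', par', nf') => levelLoop grid goal f' nf' par' ex') := by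
  intro fuel
  induction fuel with
  | zero =>
    intro frontP frontC nfP nfC vis par ex hv hf hnf
    cases hf with
    | nil =>
      cases hnf with
      | nil => simp [bfsLoopA, scanLevel, levelLoop]
      | cons h₁ h₂ => simp [bfsLoopA, scanLevel, levelLoop]
    | cons h₁ h₂ => simp [bfsLoopA, scanLevel]
  | succ f ih =>
    intro frontP frontC nfP nfC vis par ex hv hf hnf
    cases hf with
    | nil =>
      simp only [scanLevel, List.nil_append]
      cases hnf with
      | nil => simp [bfsLoopA, levelLoop]
      | @cons p c rP rC hpn htail =>
        rw [levelLoop_cons]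
        have := cell_step grid goal f p rP c rC [] [] vis par ex ih hv hpn htail
          List.Forall₂.nil
        simpa using this
    | @cons p c rP rC hpn htail =>
      exact cell_step grid goal f p rP c rC nfP nfC vis par ex ih hv hpn htail hnf

-- ===== VERDICT (by name: the statement is the Claim_ definition above) =====
theorem bfs_animado_spec : Claim_equal_bfs_animado := by
  intro grid start goal _
  show bfs_animado grid start goal = bfs_animado_alt grid start goal
  unfold bfs_animado bfs_animado_alt
  rw [levelLoop_cons]
  refine main_sim grid goal _ [[start]] [start] [] [] _ _ [] ?_ ?_ List.Forall₂.nil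
  · intro n
    rw [Bool.eq_iff_iff]
    simp only [PySem.Set.contains_iff, PySem.Set.mem_add, PySem.Dict.contains_insert,
      Bool.or_eq_true, beq_iff_eq, PySem.Dict.contains_empty, PySem.Set.empty]
    simp
  · refine List.forall₂_cons.mpr ⟨?_, List.Forall₂.nil⟩
    refine ⟨by simp, ?_, ?_, ?_⟩
    · show ChainB _ [start].reverse
      simp only [List.reverse_cons, List.reverse_nil, List.nil_append, ChainB]
      exact PySem.Dict.get?_insert_self _ _ _
    · intro q hq
      simp at hq; subst hq
      exact PySem.Dict.contains_insert_self _ _ _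
    · simp [PySem.Dict.size_insert]
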